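-- pv_equiv track=rewrite | github.com/Archaeopteryx/BugsByCycleWeekPriority | scripts/platform_org_needinfo_requests.py | filter_data_by_employee_status
-- ===== SOURCE A (Python) =====
-- def filter_data_by_employee_status(needinfos_open_by_user, employees):
--
--     needinfos_open_by_employee = {}
--     for needinfoed_user in needinfos_open_by_user:
--         if needinfoed_user in employees:
--             needinfos_open_by_employee[needinfoed_user] = needinfos_open_by_user[needinfoed_user]['needinfos']
--
--     needinfos_open_by_component = {}
--     for needinfoed_employee in needinfos_open_by_employee.keys():
--         for bug_data in needinfos_open_by_employee[needinfoed_employee]: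
--             product_component = f'{bug_data["product"]} :: {bug_data["component"]}'
--             if product_component not in needinfos_open_by_component:
--                 needinfos_open_by_component[product_component] = []
--             needinfos_open_by_component[product_component].append(bug_data)
--
--     needinfos_open_by_team = {}
--     for needinfoed_employee in needinfos_open_by_employee.keys():
--         for bug_data in needinfos_open_by_employee[needinfoed_employee]:
--             team = bug_data['team']
--             if team not in needinfos_open_by_team:
--                 needinfos_open_by_team[team] = []
--             needinfos_open_by_team[team].append(bug_data)
--
--     needinfos_open_by_team_and_employee = {}
--     for needinfoed_employee in needinfos_open_by_employee.keys():
--         for bug_data in needinfos_open_by_employee[needinfoed_employee]: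
--             team = bug_data['team']
--             if team not in needinfos_open_by_team_and_employee:
--                 needinfos_open_by_team_and_employee[team] = {}
--             if needinfoed_employee not in needinfos_open_by_team_and_employee[team]:
--                 needinfos_open_by_team_and_employee[team][needinfoed_employee] = []
--             needinfos_open_by_team_and_employee[team][needinfoed_employee].append(bug_data)
--
--     return needinfos_open_by_employee, needinfos_open_by_component, needinfos_open_by_team, needinfos_open_by_team_and_employee
-- ===== SOURCE B (Python) =====
-- def filter_data_by_employee_status(needinfos_open_by_user, employees):
--     # One pass builds the employee, component and nested team->employee groupings;
--     # the per-team grouping is then derived from the nested dict instead of a fourth scan.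
--     needinfos_open_by_employee = {}
--     needinfos_open_by_component = {}
--     needinfos_open_by_team_and_employee = {}
--
--     for user, data in needinfos_open_by_user.items():
--         if user not in employees:
--             continue
--         bugs = data['needinfos']
--         needinfos_open_by_employee[user] = bugs
--         for bug_data in bugs:
--             product_component = f'{bug_data["product"]} :: {bug_data["component"]}'
--             needinfos_open_by_component.setdefault(product_component, []).append(bug_data)
--             needinfos_open_by_team_and_employee.setdefault(bug_data['team'], {}) \
--                 .setdefault(user, []).append(bug_data)
--
--     needinfos_open_by_team = {
--         team: [bug for bug_list in per_employee.values() for bug in bug_list]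
--         for team, per_employee in needinfos_open_by_team_and_employee.items()
--     }
--
--     return (needinfos_open_by_employee, needinfos_open_by_component,
--             needinfos_open_by_team, needinfos_open_by_team_and_employee)
-- ===== Notes on version B (the rewrite author's own statement) =====
-- stated objective: alternative
-- what changed: B builds the employee, component and nested team->employee groupings in a single pass over the input and then derives the per-team grouping by concatenating each team's per-employee lists from the nested dict, instead of A's four independent grouping scans.
-- outside the precondition, e.g. on filter_data_by_employee_status({'u': {}}, {'u'}): A raises KeyError, B raises KeyError
import Mathlib
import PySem

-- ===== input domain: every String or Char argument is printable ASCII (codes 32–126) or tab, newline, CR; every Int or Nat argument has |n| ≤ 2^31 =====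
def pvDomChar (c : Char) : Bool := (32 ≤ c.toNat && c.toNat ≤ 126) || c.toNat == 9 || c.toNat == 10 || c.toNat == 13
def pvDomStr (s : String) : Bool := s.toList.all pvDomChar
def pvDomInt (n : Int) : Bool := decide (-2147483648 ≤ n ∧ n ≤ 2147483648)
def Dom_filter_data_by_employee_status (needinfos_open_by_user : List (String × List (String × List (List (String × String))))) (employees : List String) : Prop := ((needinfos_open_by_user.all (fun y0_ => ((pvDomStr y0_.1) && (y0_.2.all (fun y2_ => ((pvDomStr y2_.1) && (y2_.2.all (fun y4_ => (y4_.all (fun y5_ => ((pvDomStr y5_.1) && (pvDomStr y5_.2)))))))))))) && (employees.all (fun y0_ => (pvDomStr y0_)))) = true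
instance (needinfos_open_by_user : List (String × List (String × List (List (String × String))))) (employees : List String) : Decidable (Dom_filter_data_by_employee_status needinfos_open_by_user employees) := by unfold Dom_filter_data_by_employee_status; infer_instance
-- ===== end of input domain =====

-- B groups everything in ONE pass (employee, component, nested team→employee) and then DERIVES the
-- per-team grouping by flattening the nested dict, instead of A's four independent grouping scans (objective: alternative decomposition).

-- shared field-lookup helpers (dict lookups bug_data["product"] etc.; first-match, Python-exact via PySem.Dict)
def pvNeedinfos (v : List (String × List (List (String × String)))) : List (List (String × String)) :=
  (PySem.Dict.mk v).getD "needinfos" []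
def pvPC (bug : List (String × String)) : String :=
  (PySem.Dict.mk bug).getD "product" "" ++ " :: " ++ (PySem.Dict.mk bug).getD "component" ""
def pvTeamOf (bug : List (String × String)) : String :=
  (PySem.Dict.mk bug).getD "team" ""

-- ===== PORT A =====
-- four separate scans, each building its dict exactly as A's loops do
def filter_data_by_employee_status (needinfos_open_by_user : List (String × List (String × List (List (String × String))))) (employees : List String) : (List (String × List (List (String × String)))) × (List (String × List (List (String × String)))) × (List (String × List (List (String × String)))) × (List (String × List (String × List (List (String × String))))) :=
  let emp : PySem.Dict String (List (List (String × String))) :=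
    needinfos_open_by_user.foldl (fun d p =>
      if employees.contains p.1 then d.insert p.1 (pvNeedinfos p.2) else d) PySem.Dict.empty
  let comp : PySem.Dict String (List (List (String × String))) :=
    emp.items.foldl (fun d p =>
      p.2.foldl (fun d bug => d.modify (pvPC bug) [] (· ++ [bug])) d) PySem.Dict.empty
  let team : PySem.Dict String (List (List (String × String))) :=
    emp.items.foldl (fun d p =>
      p.2.foldl (fun d bug => d.modify (pvTeamOf bug) [] (· ++ [bug])) d) PySem.Dict.empty
  let tae : PySem.Dict String (PySem.Dict String (List (List (String × String)))) :=
    emp.items.foldl (fun d p =>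
      p.2.foldl (fun d bug =>
        d.modify (pvTeamOf bug) PySem.Dict.empty (fun inner => inner.modify p.1 [] (· ++ [bug]))) d) PySem.Dict.empty
  (emp.items, comp.items, team.items, tae.items.map (fun q => (q.1, q.2.items)))

-- ===== PORT B =====
-- one pass building (employee, component, team→employee); by_team derived from the nested dict
def filter_data_by_employee_status_alt (needinfos_open_by_user : List (String × List (String × List (List (String × String))))) (employees : List String) : (List (String × List (List (String × String)))) × (List (String × List (List (String × String)))) × (List (String × List (List (String × String)))) × (List (String × List (String × List (List (String × String))))) :=
  let st :=
    needinfos_open_by_user.foldl (fun (st : PySem.Dict String (List (List (String × String))) × PySem.Dict String (List (List (String × String))) × PySem.Dict String (PySem.Dict String (List (List (String × String))))) p =>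
      if employees.contains p.1 then
        let bugs := pvNeedinfos p.2
        let ct := bugs.foldl (fun (q : PySem.Dict String (List (List (String × String))) × PySem.Dict String (PySem.Dict String (List (List (String × String))))) bug =>
            (q.1.modify (pvPC bug) [] (· ++ [bug]),
             q.2.modify (pvTeamOf bug) PySem.Dict.empty (fun inner => inner.modify p.1 [] (· ++ [bug])))) (st.2.1, st.2.2)
        (st.1.insert p.1 bugs, ct.1, ct.2)
      else st)
      (PySem.Dict.empty, PySem.Dict.empty, PySem.Dict.empty)
  (st.1.items, st.2.1.items,
   st.2.2.items.map (fun q => (q.1, (q.2.values).flatten)),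
   st.2.2.items.map (fun q => (q.1, q.2.items)))

-- ===== PRECONDITION & SPEC =====
-- Pre_ excludes (a) association-lists with duplicate top-level user keys, which do not represent any
-- Python dict input, and (b) inputs where a filtered-in user's value lacks the key 'needinfos' or a bug
-- dict lacks 'product'/'component'/'team', on which A raises KeyError.
def Pre_filter_data_by_employee_status (needinfos_open_by_user : List (String × List (String × List (List (String × String))))) (employees : List String) : Prop :=
  (needinfos_open_by_user.map Prod.fst).Nodup ∧
  ∀ p ∈ needinfos_open_by_user, employees.contains p.1 = true →
    (PySem.Dict.mk p.2).contains "needinfos" = true ∧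
    ∀ bug ∈ pvNeedinfos p.2,
      (PySem.Dict.mk bug).contains "product" = true ∧
      (PySem.Dict.mk bug).contains "component" = true ∧
      (PySem.Dict.mk bug).contains "team" = true
instance (needinfos_open_by_user : List (String × List (String × List (List (String × String))))) (employees : List String) : Decidable (Pre_filter_data_by_employee_status needinfos_open_by_user employees) := by unfold Pre_filter_data_by_employee_status; infer_instance

def pvWitness_filter_data_by_employee_status : (List (String × List (String × List (List (String × String))))) × List String :=
  ([("alice", [("needinfos", [[("product", "Core"), ("component", "DOM"), ("team", "T1")]])]),
    ("bob", [("needinfos", [[("product", "Core"), ("component", "JS"), ("team", "T1")]])])],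
   ["alice", "bob"])

def Spec_filter_data_by_employee_status (needinfos_open_by_user : List (String × List (String × List (List (String × String))))) (employees : List String) (out : (List (String × List (List (String × String)))) × (List (String × List (List (String × String)))) × (List (String × List (List (String × String)))) × (List (String × List (String × List (List (String × String)))))) : Prop := out = filter_data_by_employee_status_alt needinfos_open_by_user employees
instance (needinfos_open_by_user : List (String × List (String × List (List (String × String))))) (employees : List String) (out : (List (String × List (List (String × String)))) × (List (String × List (List (String × String)))) × (List (String × List (List (String × String)))) × (List (String × List (String × List (List (String × String)))))) : Decidable (Spec_filter_data_by_employee_status needinfos_open_by_user employees out) := by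
  unfold Spec_filter_data_by_employee_status
  -- the default instance search exceeds its depth limit on this 4-tuple; assemble it explicitly
  have h1 : DecidableEq (List (String × List (List (String × String)))) := inferInstance
  have h4 : DecidableEq (List (String × List (String × List (List (String × String))))) := inferInstance
  exact @instDecidableEqProd _ _ h1 (@instDecidableEqProd _ _ h1 (@instDecidableEqProd _ _ h1 h4)) _ _

-- ===== CLAIM (what is proved, stated in full; the proofs are below) =====
def Claim_equal_filter_data_by_employee_status : Prop := ∀ (needinfos_open_by_user : List (String × List (String × List (List (String × String))))) (employees : List String), Dom_filter_data_by_employee_status needinfos_open_by_user employees → Pre_filter_data_by_employee_status needinfos_open_by_user employees → Spec_filter_data_by_employee_status needinfos_open_by_user employees (filter_data_by_employee_status needinfos_open_by_user employees)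

-- ===== LEMMAS AND PROOFS =====

-- ---- proof-only helpers ----

-- the (user, bug) pair stream a list of (user, bug-list) entries generates
def pvPairs (es : List (String × List (List (String × String)))) : List (String × List (String × String)) :=
  es.flatMap (fun p => p.2.map (fun b => (p.1, b)))

-- the filtered employee entries both programs select, in order
def pvF (needinfos_open_by_user : List (String × List (String × List (List (String × String))))) (employees : List String) : List (String × List (List (String × String))) :=
  (needinfos_open_by_user.filter (fun p => employees.contains p.1)).map (fun p => (p.1, pvNeedinfos p.2))

-- the four grouping steps, named so the folds can be rewritten
def pvInsStep (d : PySem.Dict String (List (List (String × String)))) (p : String × List (List (String × String))) : PySem.Dict String (List (List (String × String))) :=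
  d.insert p.1 p.2
def pvCompStep (d : PySem.Dict String (List (List (String × String)))) (q : String × List (String × String)) : PySem.Dict String (List (List (String × String))) :=
  d.modify (pvPC q.2) [] (· ++ [q.2])
def pvTeamStep (d : PySem.Dict String (List (List (String × String)))) (q : String × List (String × String)) : PySem.Dict String (List (List (String × String))) :=
  d.modify (pvTeamOf q.2) [] (· ++ [q.2])
def pvTaeStep (d : PySem.Dict String (PySem.Dict String (List (List (String × String))))) (q : String × List (String × String)) : PySem.Dict String (PySem.Dict String (List (List (String × String)))) :=
  d.modify (pvTeamOf q.2) PySem.Dict.empty (fun inner => inner.modify q.1 [] (· ++ [q.2]))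
def pvInnerStep (d : PySem.Dict String (List (List (String × String)))) (q : String × List (String × String)) : PySem.Dict String (List (List (String × String))) :=
  d.modify q.1 [] (· ++ [q.2])

-- getD of a keyed modify-fold is a fold over the matching elements
theorem pv_getD_foldl_modify {kappa nu beta : Type} [BEq kappa] [LawfulBEq kappa] [DecidableEq kappa]
    (l : List beta) (key : beta → kappa) (d0 : nu) (f : beta → nu → nu) :
    ∀ (d : PySem.Dict kappa nu) (c : kappa),
      (l.foldl (fun d x => d.modify (key x) d0 (f x)) d).getD c d0
        = (l.filter (fun x => key x == c)).foldl (fun v x => f x v) (d.getD c d0) := by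
  induction l with
  | nil => intro d c; simp
  | cons x xs ih =>
      intro d c
      by_cases h : key x = c
      · simp only [List.foldl_cons, List.filter_cons, h, beq_self_eq_true, if_true]
        rw [ih, PySem.Dict.getD_modify]
        simp
      · have hb : (key x == c) = false := by simp [h]
        simp only [List.foldl_cons, List.filter_cons, hb, Bool.false_eq_true, if_false]
        rw [ih, PySem.Dict.getD_modify]
        simp [Ne.symm h]

theorem pv_pairs_cons (p : String × List (List (String × String)))
    (es : List (String × List (List (String × String)))) :
    pvPairs (p :: es) = p.2.map (fun b => (p.1, b)) ++ pvPairs es := by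
  simp [pvPairs]

-- a nested fold over entries is a flat fold over the pair stream
theorem pv_foldl_pairs {sigma : Type} (es : List (String × List (List (String × String))))
    (f : sigma → (String × List (String × String)) → sigma) :
    ∀ (init : sigma),
      es.foldl (fun d p => p.2.foldl (fun d b => f d (p.1, b)) d) init
        = (pvPairs es).foldl f init := by
  induction es with
  | nil => intro init; simp [pvPairs]
  | cons p es ih =>
      intro init
      rw [List.foldl_cons, pv_pairs_cons, List.foldl_append, ih]
      congr 1
      rw [List.foldl_map]

-- the three flat-fold forms of A's nested loops
theorem pv_flat_comp (es : List (String × List (List (String × String))))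
    (init : PySem.Dict String (List (List (String × String)))) :
    es.foldl (fun d p => p.2.foldl (fun d bug => d.modify (pvPC bug) [] (· ++ [bug])) d) init
      = (pvPairs es).foldl pvCompStep init := pv_foldl_pairs es pvCompStep init
theorem pv_flat_team (es : List (String × List (List (String × String))))
    (init : PySem.Dict String (List (List (String × String)))) :
    es.foldl (fun d p => p.2.foldl (fun d bug => d.modify (pvTeamOf bug) [] (· ++ [bug])) d) init
      = (pvPairs es).foldl pvTeamStep init := pv_foldl_pairs es pvTeamStep init
theorem pv_flat_tae (es : List (String × List (List (String × String))))
    (init : PySem.Dict String (PySem.Dict String (List (List (String × String))))) :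
    es.foldl (fun d p => p.2.foldl (fun d bug =>
        d.modify (pvTeamOf bug) PySem.Dict.empty (fun inner => inner.modify p.1 [] (· ++ [bug]))) d) init
      = (pvPairs es).foldl pvTaeStep init := pv_foldl_pairs es pvTaeStep init

-- filtering the pair stream by a predicate on the bug filters each entry's bug list
theorem pv_pairs_filter (es : List (String × List (List (String × String))))
    (P : List (String × String) → Bool) :
    (pvPairs es).filter (fun q => P q.2)
      = pvPairs (es.map (fun p => (p.1, p.2.filter P))) := by
  induction es with
  | nil => simp [pvPairs]
  | cons p es ih =>
      rw [List.map_cons, pv_pairs_cons, pv_pairs_cons, List.filter_append, ih]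
      congr 1
      rw [List.filter_map]
      rfl

theorem pv_mem_pairs_fst (es : List (String × List (List (String × String))))
    (r : String × List (String × String)) (h : r ∈ pvPairs es) : r.1 ∈ es.map Prod.fst := by
  simp only [pvPairs, List.mem_flatMap, List.mem_map] at h
  obtain ⟨p, hp, b, _, rfl⟩ := h
  exact List.mem_map_of_mem hp

theorem pv_discard_not_mem {alpha : Type} [BEq alpha] [LawfulBEq alpha]
    (s : PySem.Set alpha) (u : alpha) (hu : u ∉ s) : PySem.Set.discard s u = s := by
  simp only [PySem.Set.discard]
  rw [List.filter_eq_self]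
  intro a ha
  have hne : a ≠ u := fun he => hu (he ▸ ha)
  simp [hne]

-- set of a constant nonempty block prepended to fresh elements
theorem pv_ofList_const_append {alpha beta : Type} [BEq alpha] [LawfulBEq alpha]
    (u : alpha) (X : List alpha) (hu : u ∉ X) :
    ∀ (bs : List beta), bs ≠ [] →
      PySem.Set.ofList ((bs.map fun _ => u) ++ X) = u :: PySem.Set.ofList X := by
  intro bs
  induction bs with
  | nil => intro h; exact absurd rfl h
  | cons b bs ih =>
      intro _
      have hX : u ∉ PySem.Set.ofList X := fun hm => hu ((PySem.Set.mem_ofList X u).mp hm)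
      by_cases hbs : bs = []
      · subst hbs
        simp only [List.map_cons, List.map_nil, List.nil_append, List.cons_append,
          PySem.Set.ofList_cons]
        rw [pv_discard_not_mem _ _ hX]
      · simp only [List.map_cons, List.cons_append, PySem.Set.ofList_cons]
        rw [ih hbs]
        rw [show PySem.Set.discard (u :: PySem.Set.ofList X) u
              = PySem.Set.discard (PySem.Set.ofList X) u from by simp [PySem.Set.discard],
            pv_discard_not_mem _ _ hX]

-- HEART: concatenating the per-user groups (users in first-appearance order) of a
-- user-blocked pair stream restores the stream's bug order
theorem pv_heart (blocks : List (String × List (List (String × String))))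
    (h : (blocks.map Prod.fst).Nodup) :
    ((PySem.Set.ofList ((pvPairs blocks).map Prod.fst)).map
        (fun u => ((pvPairs blocks).filter (fun r => r.1 == u)).map Prod.snd)).flatten
      = (pvPairs blocks).map Prod.snd := by
  induction blocks with
  | nil => simp [pvPairs]
  | cons p rest ih =>
      have h' : (p.1 :: rest.map Prod.fst).Nodup := by simpa using h
      have hu : p.1 ∉ rest.map Prod.fst := (List.nodup_cons.mp h').1
      have ih' := ih (List.nodup_cons.mp h').2
      have hRfst : ∀ r ∈ pvPairs rest, r.1 ≠ p.1 := by
        intro r hr he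
        exact hu (he ▸ pv_mem_pairs_fst rest r hr)
      by_cases hp2 : p.2 = []
      · rw [pv_pairs_cons, hp2]
        simpa using ih'
      · have hnm : p.1 ∉ (pvPairs rest).map Prod.fst := by
          simp only [List.mem_map]
          rintro ⟨r, hr, he⟩
          exact hRfst r hr he
        have hAfst : (p.2.map (fun b => (p.1, b))).map Prod.fst = p.2.map (fun _ => p.1) := by
          simp
        have hkey : PySem.Set.ofList ((pvPairs (p :: rest)).map Prod.fst)
            = p.1 :: PySem.Set.ofList ((pvPairs rest).map Prod.fst) := by
          rw [pv_pairs_cons, List.map_append, hAfst]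
          exact pv_ofList_const_append p.1 _ hnm p.2 hp2
        rw [hkey, List.map_cons, List.flatten_cons]
        have h1 : (p.2.map (fun b => (p.1, b))).filter (fun r => r.1 == p.1)
            = p.2.map (fun b => (p.1, b)) := by
          rw [List.filter_eq_self]
          intro a ha
          simp only [List.mem_map] at ha
          obtain ⟨b, _, rfl⟩ := ha
          simp
        have h2 : (pvPairs rest).filter (fun r => r.1 == p.1) = [] := by
          rw [List.filter_eq_nil_iff]
          intro a ha
          simp [hRfst a ha]
        have hg1 : ((pvPairs (p :: rest)).filter (fun r => r.1 == p.1)).map Prod.snd = p.2 := by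
          rw [pv_pairs_cons, List.filter_append, h1, h2, List.append_nil, List.map_map]
          simp
        have hgR : ∀ u ∈ PySem.Set.ofList ((pvPairs rest).map Prod.fst),
            ((pvPairs (p :: rest)).filter (fun r => r.1 == u)).map Prod.snd
              = ((pvPairs rest).filter (fun r => r.1 == u)).map Prod.snd := by
          intro u humem
          have hune : u ≠ p.1 := by
            have hm : u ∈ (pvPairs rest).map Prod.fst := (PySem.Set.mem_ofList _ _).mp humem
            simp only [List.mem_map] at hm
            obtain ⟨r, hr, rfl⟩ := hm
            exact hRfst r hr
          have hz : (p.2.map (fun b => (p.1, b))).filter (fun r => r.1 == u) = [] := by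
            rw [List.filter_eq_nil_iff]
            intro a ha
            simp only [List.mem_map] at ha
            obtain ⟨b, _, rfl⟩ := ha
            simp [Ne.symm hune]
          rw [pv_pairs_cons, List.filter_append, hz, List.nil_append]
        rw [hg1, List.map_congr_left hgR, ih', pv_pairs_cons, List.map_append, List.map_map]
        simp

-- A's first loop builds exactly the filtered entry list
theorem pv_empA (l : List (String × List (String × List (List (String × String)))))
    (employees : List String) (h : (l.map Prod.fst).Nodup) :
    (l.foldl (fun d p => if employees.contains p.1 then d.insert p.1 (pvNeedinfos p.2) else d)
        PySem.Dict.empty).items = pvF l employees := by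
  have hnd2 : ((l.filter (fun p => employees.contains p.1)).map (fun p => p.1)).Nodup :=
    List.Nodup.sublist (List.Sublist.map _ List.filter_sublist) h
  have hff : (l.filter (fun p => employees.contains p.1)).foldl
      (fun d p => d.insert p.1 (pvNeedinfos p.2)) PySem.Dict.empty
      = l.foldl (fun d p => if employees.contains p.1 then d.insert p.1 (pvNeedinfos p.2) else d)
          PySem.Dict.empty := List.foldl_filter
  rw [← hff]
  have hfresh : ((l.filter (fun p => employees.contains p.1)).foldl
      (fun d p => d.insert p.1 (pvNeedinfos p.2)) PySem.Dict.empty).items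
      = PySem.Dict.empty.items
        ++ (l.filter (fun p => employees.contains p.1)).map (fun p => (p.1, pvNeedinfos p.2)) :=
    PySem.Dict.items_foldl_insert_fresh (l.filter (fun p => employees.contains p.1))
      (fun p => p.1) (fun p => pvNeedinfos p.2) PySem.Dict.empty
      (fun a _ => PySem.Dict.contains_empty _) hnd2
  rw [hfresh]
  simp [pvF, PySem.Dict.empty]

-- B's one-pass fold is three independent folds over the filtered stream
theorem pv_B_split (employees : List String)
    (l : List (String × List (String × List (List (String × String))))) :
    ∀ (e c : PySem.Dict String (List (List (String × String))))
      (t : PySem.Dict String (PySem.Dict String (List (List (String × String))))),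
      l.foldl (fun (st : PySem.Dict String (List (List (String × String))) × PySem.Dict String (List (List (String × String))) × PySem.Dict String (PySem.Dict String (List (List (String × String))))) p =>
        if employees.contains p.1 then
          let bugs := pvNeedinfos p.2
          let ct := bugs.foldl (fun (q : PySem.Dict String (List (List (String × String))) × PySem.Dict String (PySem.Dict String (List (List (String × String))))) bug =>
              (q.1.modify (pvPC bug) [] (· ++ [bug]),
               q.2.modify (pvTeamOf bug) PySem.Dict.empty (fun inner => inner.modify p.1 [] (· ++ [bug])))) (st.2.1, st.2.2)
          (st.1.insert p.1 bugs, ct.1, ct.2)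
        else st) (e, c, t)
      = ((pvF l employees).foldl pvInsStep e,
         (pvPairs (pvF l employees)).foldl pvCompStep c,
         (pvPairs (pvF l employees)).foldl pvTaeStep t) := by
  induction l with
  | nil => intro e c t; simp [pvF, pvPairs]
  | cons p l ih =>
      intro e c t
      by_cases hp : employees.contains p.1
      · have hp' : p.1 ∈ employees := by simpa using hp
        have hF : pvF (p :: l) employees = (p.1, pvNeedinfos p.2) :: pvF l employees := by
          simp [pvF, hp']
        simp only [List.foldl_cons, hp, if_true]
        have hct : (pvNeedinfos p.2).foldl (fun (q : PySem.Dict String (List (List (String × String))) × PySem.Dict String (PySem.Dict String (List (List (String × String))))) bug =>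
              (q.1.modify (pvPC bug) [] (· ++ [bug]),
               q.2.modify (pvTeamOf bug) PySem.Dict.empty (fun inner => inner.modify p.1 [] (· ++ [bug])))) (c, t)
            = ((pvNeedinfos p.2).foldl (fun q1 bug => q1.modify (pvPC bug) [] (· ++ [bug])) c,
               (pvNeedinfos p.2).foldl (fun q2 bug => q2.modify (pvTeamOf bug) PySem.Dict.empty
                 (fun inner => inner.modify p.1 [] (· ++ [bug]))) t) :=
          PySem.List.foldl_prod_mk
            (f := fun (q1 : PySem.Dict String (List (List (String × String)))) bug =>
              q1.modify (pvPC bug) [] (· ++ [bug]))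
            (g := fun (q2 : PySem.Dict String (PySem.Dict String (List (List (String × String))))) bug =>
              q2.modify (pvTeamOf bug) PySem.Dict.empty (fun inner => inner.modify p.1 [] (· ++ [bug])))
            _ _ _
        rw [hct, ih, hF, pv_pairs_cons]
        rw [List.foldl_cons, List.foldl_append, List.foldl_append, List.foldl_map, List.foldl_map]
        rfl
      · have hp' : p.1 ∉ employees := by simpa using hp
        have hF : pvF (p :: l) employees = pvF l employees := by
          simp [pvF, hp']
        simp only [List.foldl_cons, hp, if_false, Bool.false_eq_true]
        rw [ih, hF]

-- characterizations of the keyed folds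
theorem pv_keys_team (ps : List (String × List (String × String))) :
    (ps.foldl pvTeamStep PySem.Dict.empty).keys = PySem.Set.ofList (ps.map (fun q => pvTeamOf q.2)) := by
  have h : (ps.foldl pvTeamStep PySem.Dict.empty).keys
      = PySem.Set.update (PySem.Dict.empty : PySem.Dict String (List (List (String × String)))).keys
          (ps.map (fun q => pvTeamOf q.2)) :=
    PySem.Dict.keys_foldl_modify_key ps (fun q => pvTeamOf q.2) [] (fun _ q => (· ++ [q.2]))
      PySem.Dict.empty
  rw [h, PySem.Dict.keys_empty, PySem.Set.update_nil_left]

theorem pv_keys_tae (ps : List (String × List (String × String))) :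
    (ps.foldl pvTaeStep PySem.Dict.empty).keys = PySem.Set.ofList (ps.map (fun q => pvTeamOf q.2)) := by
  have h : (ps.foldl pvTaeStep PySem.Dict.empty).keys
      = PySem.Set.update (PySem.Dict.empty : PySem.Dict String (PySem.Dict String (List (List (String × String))))).keys
          (ps.map (fun q => pvTeamOf q.2)) :=
    PySem.Dict.keys_foldl_modify_key ps (fun q => pvTeamOf q.2) PySem.Dict.empty
      (fun _ q => (fun inner => inner.modify q.1 [] (· ++ [q.2]))) PySem.Dict.empty
  rw [h, PySem.Dict.keys_empty, PySem.Set.update_nil_left]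

theorem pv_keys_inner (qs : List (String × List (String × String))) :
    (qs.foldl pvInnerStep PySem.Dict.empty).keys = PySem.Set.ofList (qs.map Prod.fst) := by
  have h : (qs.foldl pvInnerStep PySem.Dict.empty).keys
      = PySem.Set.update (PySem.Dict.empty : PySem.Dict String (List (List (String × String)))).keys
          (qs.map (fun q => q.1)) :=
    PySem.Dict.keys_foldl_modify_key qs (fun q => q.1) [] (fun _ q => (· ++ [q.2]))
      PySem.Dict.empty
  rw [h, PySem.Dict.keys_empty, PySem.Set.update_nil_left]

theorem pv_nodup_team (ps : List (String × List (String × String))) :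
    (ps.foldl pvTeamStep PySem.Dict.empty).keys.Nodup :=
  PySem.Dict.nodup_keys_foldl_modify_key ps (fun q => pvTeamOf q.2) [] (fun _ q => (· ++ [q.2]))
    PySem.Dict.empty PySem.Dict.nodup_keys_empty
theorem pv_nodup_tae (ps : List (String × List (String × String))) :
    (ps.foldl pvTaeStep PySem.Dict.empty).keys.Nodup :=
  PySem.Dict.nodup_keys_foldl_modify_key ps (fun q => pvTeamOf q.2) PySem.Dict.empty
    (fun _ q => (fun inner => inner.modify q.1 [] (· ++ [q.2]))) PySem.Dict.empty
    PySem.Dict.nodup_keys_empty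
theorem pv_nodup_inner (qs : List (String × List (String × String))) :
    (qs.foldl pvInnerStep PySem.Dict.empty).keys.Nodup :=
  PySem.Dict.nodup_keys_foldl_modify_key qs (fun q => q.1) [] (fun _ q => (· ++ [q.2]))
    PySem.Dict.empty PySem.Dict.nodup_keys_empty

theorem pv_getD_team (ps : List (String × List (String × String))) (c : String) :
    (ps.foldl pvTeamStep PySem.Dict.empty).getD c []
      = (ps.filter (fun q => pvTeamOf q.2 == c)).foldl (fun v q => v ++ [q.2]) [] :=
  pv_getD_foldl_modify ps (fun q => pvTeamOf q.2) [] (fun q => (· ++ [q.2])) PySem.Dict.empty c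

theorem pv_getD_tae (ps : List (String × List (String × String))) (c : String) :
    (ps.foldl pvTaeStep PySem.Dict.empty).getD c PySem.Dict.empty
      = (ps.filter (fun q => pvTeamOf q.2 == c)).foldl pvInnerStep PySem.Dict.empty :=
  pv_getD_foldl_modify ps (fun q => pvTeamOf q.2) PySem.Dict.empty
    (fun q => (fun inner => inner.modify q.1 [] (· ++ [q.2]))) PySem.Dict.empty c

theorem pv_getD_inner (qs : List (String × List (String × String))) (u : String) :
    (qs.foldl pvInnerStep PySem.Dict.empty).getD u []
      = (qs.filter (fun r => r.1 == u)).map Prod.snd := by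
  have h : (qs.foldl pvInnerStep PySem.Dict.empty).getD u []
      = PySem.Dict.empty.getD u [] ++ (qs.filter (fun r => r.1 == u)).map (fun r => r.2) :=
    PySem.Dict.getD_foldl_modify_append qs PySem.Dict.empty u
  rw [h, PySem.Dict.getD_empty, List.nil_append]

theorem pv_foldl_snd (qs : List (String × List (String × String))) :
    qs.foldl (fun v q => v ++ [q.2]) ([] : List (List (String × String))) = qs.map Prod.snd := by
  have h := PySem.List.foldl_append_singleton_eq_map
    (fun q : String × List (String × String) => q.2) qs []
  simpa using h

-- the per-team dict's items equal the nested dict's items with each team's employee lists concatenated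
theorem pv_team_eq (blocks : List (String × List (List (String × String))))
    (hnd : (blocks.map Prod.fst).Nodup) :
    ((pvPairs blocks).foldl pvTeamStep PySem.Dict.empty).items
      = (((pvPairs blocks).foldl pvTaeStep PySem.Dict.empty).items).map
          (fun q => (q.1, (q.2.values).flatten)) := by
  rw [PySem.Dict.items_eq_map_keys _ (pv_nodup_team (pvPairs blocks)) ([] : List (List (String × String))),
      PySem.Dict.items_eq_map_keys _ (pv_nodup_tae (pvPairs blocks))
        (PySem.Dict.empty : PySem.Dict String (List (List (String × String))))]
  rw [pv_keys_team, pv_keys_tae, List.map_map]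
  apply List.map_congr_left
  intro t _
  show (t, ((pvPairs blocks).foldl pvTeamStep PySem.Dict.empty).getD t [])
      = (t, (((pvPairs blocks).foldl pvTaeStep PySem.Dict.empty).getD t PySem.Dict.empty).values.flatten)
  have hq : (pvPairs blocks).filter (fun q => pvTeamOf q.2 == t)
      = pvPairs (blocks.map (fun p => (p.1, p.2.filter (fun b => pvTeamOf b == t)))) :=
    pv_pairs_filter blocks (fun b => pvTeamOf b == t)
  have hnd' : ((blocks.map (fun p => (p.1, p.2.filter (fun b => pvTeamOf b == t)))).map Prod.fst).Nodup := by
    rw [List.map_map]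
    simpa using hnd
  have hA : ((pvPairs blocks).foldl pvTeamStep PySem.Dict.empty).getD t []
      = ((pvPairs blocks).filter (fun q => pvTeamOf q.2 == t)).map Prod.snd := by
    rw [pv_getD_team, pv_foldl_snd]
  have hB : (((pvPairs blocks).foldl pvTaeStep PySem.Dict.empty).getD t PySem.Dict.empty).values.flatten
      = ((pvPairs blocks).filter (fun q => pvTeamOf q.2 == t)).map Prod.snd := by
    rw [pv_getD_tae, hq]
    rw [PySem.Dict.values_eq_map_keys _ (pv_nodup_inner _) ([] : List (List (String × String)))]
    rw [pv_keys_inner]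
    rw [List.map_congr_left (fun u _ => pv_getD_inner
      (pvPairs (blocks.map (fun p => (p.1, p.2.filter (fun b => pvTeamOf b == t))))) u)]
    exact pv_heart _ hnd'
  exact congrArg (fun x => (t, x)) (hA.trans hB.symm)

-- ===== VERDICT (by name: the statement is the Claim_ definition above) =====
theorem filter_data_by_employee_status_spec : Claim_equal_filter_data_by_employee_status := by
  intro l employees _ hpre
  unfold Spec_filter_data_by_employee_status
  obtain ⟨hnd, -⟩ := hpre
  simp only [filter_data_by_employee_status, filter_data_by_employee_status_alt]
  rw [pv_B_split]
  have hemp : (pvF l employees).foldl pvInsStep PySem.Dict.empty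
      = l.foldl (fun d p => if employees.contains p.1 then d.insert p.1 (pvNeedinfos p.2) else d)
          PySem.Dict.empty := by
    rw [pvF, List.foldl_map]
    exact List.foldl_filter
  have hndF : ((pvF l employees).map Prod.fst).Nodup := by
    have he : (pvF l employees).map Prod.fst
        = (l.filter (fun p => employees.contains p.1)).map (fun p => p.1) := by
      rw [pvF, List.map_map]
      rfl
    rw [he]
    exact List.Nodup.sublist (List.Sublist.map _ List.filter_sublist) hnd
  refine Prod.ext ?_ (Prod.ext ?_ (Prod.ext ?_ ?_))
  · exact congrArg PySem.Dict.items hemp.symm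
  · show (List.foldl (fun d p => p.2.foldl (fun d bug => d.modify (pvPC bug) [] (· ++ [bug])) d)
        PySem.Dict.empty
        (l.foldl (fun d p => if employees.contains p.1 then d.insert p.1 (pvNeedinfos p.2) else d)
          PySem.Dict.empty).items).items
      = ((pvPairs (pvF l employees)).foldl pvCompStep PySem.Dict.empty).items
    rw [pv_empA l employees hnd, pv_flat_comp]
  · show (List.foldl (fun d p => p.2.foldl (fun d bug => d.modify (pvTeamOf bug) [] (· ++ [bug])) d)
        PySem.Dict.empty
        (l.foldl (fun d p => if employees.contains p.1 then d.insert p.1 (pvNeedinfos p.2) else d)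
          PySem.Dict.empty).items).items
      = ((pvPairs (pvF l employees)).foldl pvTaeStep PySem.Dict.empty).items.map
          (fun q => (q.1, (q.2.values).flatten))
    rw [pv_empA l employees hnd, pv_flat_team]
    exact pv_team_eq (pvF l employees) hndF
  · show (List.foldl (fun d p => p.2.foldl (fun d bug =>
            d.modify (pvTeamOf bug) PySem.Dict.empty
              (fun inner => inner.modify p.1 [] (· ++ [bug]))) d)
        PySem.Dict.empty
        (l.foldl (fun d p => if employees.contains p.1 then d.insert p.1 (pvNeedinfos p.2) else d)
          PySem.Dict.empty).items).items.map (fun q => (q.1, q.2.items))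
      = ((pvPairs (pvF l employees)).foldl pvTaeStep PySem.Dict.empty).items.map
          (fun q => (q.1, q.2.items))
    rw [pv_empA l employees hnd, pv_flat_tae]
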